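-- pv_equiv track=rewrite | github.com/kaushal00007/Pyhton-Basics | course_2_assessment_6.py | beginning
-- ===== SOURCE A (Python) =====
-- def beginning(list):
--     i = 0
--     New_list = []
--
--     while i < len(list):
--         if list[i] == "bye":
--             break
--         New_list.append(list[i])
--         i = i + 1
--     part1 = New_list[:10]
--     return part1
-- ===== SOURCE B (Python) =====
-- def beginning(list):
--     head = list[:10]
--     if "bye" in head:
--         return head[:head.index("bye")]
--     return head
-- ===== Notes on version B (the rewrite author's own statement) =====
-- stated objective: simpler
-- what changed: Replaces the index/accumulator while-loop with break by slicing the first 10 elements up front and cutting at the first 'bye' via membership test and index/slice; no loop or accumulator remains, so only min(n,10) elements are inspected.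
import Mathlib
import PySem

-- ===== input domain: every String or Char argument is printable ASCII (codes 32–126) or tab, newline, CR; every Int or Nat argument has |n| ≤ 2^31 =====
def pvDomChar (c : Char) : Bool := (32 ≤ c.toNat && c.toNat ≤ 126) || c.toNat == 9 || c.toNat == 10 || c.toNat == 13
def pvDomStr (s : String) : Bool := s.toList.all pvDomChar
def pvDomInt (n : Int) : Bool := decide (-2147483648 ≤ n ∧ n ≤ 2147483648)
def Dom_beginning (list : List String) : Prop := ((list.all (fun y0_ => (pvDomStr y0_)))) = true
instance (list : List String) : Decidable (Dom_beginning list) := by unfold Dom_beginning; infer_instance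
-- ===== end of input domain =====

-- B replaces A's index/accumulator while-loop (break at "bye", then slice) by slicing the
-- first 10 elements up front and cutting at the first "bye" via membership + index + slice.

-- ===== PORT A =====
-- the while loop: index i, accumulator New_list, break on "bye"
def beginningGo (list : List String) (i : Nat) (acc : List String) : List String :=
  if h : i < list.length then
    if list[i] = "bye" then acc
    else beginningGo list (i + 1) (acc ++ [list[i]])
  else acc
termination_by list.length - i

def beginning (list : List String) : List String :=
  -- New_list[:10] with a nonnegative literal stop = take 10
  (beginningGo list 0 []).take 10

-- ===== PORT B =====
def beginning_alt (list : List String) : List String :=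
  let head := list.take 10        -- list[:10]
  if "bye" ∈ head then            -- "bye" in head
    match PySem.List.index? head "bye" with   -- head.index("bye"); guarded by the membership test
    | some k => head.take k       -- head[:k]
    | none => head                -- unreachable under the guard
  else head

-- ===== PRECONDITION & SPEC =====
def Spec_beginning (list : List String) (out : List String) : Prop := out = beginning_alt list
instance (list : List String) (out : List String) : Decidable (Spec_beginning list out) := by unfold Spec_beginning; infer_instance

-- ===== CLAIM (what is proved, stated in full; the proofs are below) =====
def Claim_equal_beginning : Prop := ∀ (list : List String), Dom_beginning list → Spec_beginning list (beginning list)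

-- ===== LEMMAS AND PROOFS =====

lemma beginningGo_eq (list : List String) : ∀ (i : Nat) (acc : List String),
    beginningGo list i acc = acc ++ (list.drop i).takeWhile (fun x => x != "bye") := by
  intro i
  induction hn : list.length - i using Nat.strong_induction_on generalizing i with
  | _ n ih =>
    intro acc
    rw [beginningGo]
    by_cases h : i < list.length
    · have hd : list.drop i = list[i] :: list.drop (i + 1) := List.drop_eq_getElem_cons h
      by_cases hb : list[i] = "bye"
      · simp [h, hb, hd]
      · rw [dif_pos h, if_neg hb, ih (list.length - (i + 1)) (by omega) (i + 1) rfl (acc ++ [list[i]]), hd]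
        rw [List.takeWhile_cons]
        simp [hb]
    · simp [h, List.drop_eq_nil_of_le (by omega : list.length ≤ i)]

lemma index_cut_eq_takeWhile (l : List String) :
    (match PySem.List.index? l "bye" with
     | some k => l.take k
     | none => l) = l.takeWhile (fun x => x != "bye") := by
  induction l with
  | nil => simp [PySem.List.index?_eq_idxOf?]
  | cons x xs ih =>
    by_cases hx : x = "bye"
    · subst hx
      rw [PySem.List.index?_cons_self]
      simp [List.takeWhile]
    · rw [PySem.List.index?_cons_of_ne xs hx]
      cases h : PySem.List.index? xs "bye" with
      | none => rw [h] at ih; simpa [List.takeWhile_cons, hx] using ih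
      | some k => rw [h] at ih; simpa [List.takeWhile_cons, hx] using ih

lemma takeWhile_take (p : String → Bool) (l : List String) (n : Nat) :
    (l.takeWhile p).take n = (l.take n).takeWhile p := by
  induction l generalizing n with
  | nil => simp
  | cons x xs ih =>
    cases n with
    | zero => simp [List.takeWhile]
    | succ m =>
      by_cases hx : p x <;> simp [List.takeWhile, hx, ih]

-- ===== VERDICT (by name: the statement is the Claim_ definition above) =====
theorem beginning_spec : Claim_equal_beginning := by
  intro list _
  show beginning list = beginning_alt list
  have hA : beginning list = (list.takeWhile (fun x => x != "bye")).take 10 := by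
    simp [beginning, beginningGo_eq]
  have hB : beginning_alt list = (list.take 10).takeWhile (fun x => x != "bye") := by
    unfold beginning_alt
    by_cases h : "bye" ∈ list.take 10
    · simp only [h, if_pos]
      exact index_cut_eq_takeWhile _
    · simp only [h, if_neg, not_false_iff]
      have := index_cut_eq_takeWhile (list.take 10)
      rw [(PySem.List.index?_eq_none_iff _ _).2 h] at this
      exact this.symm ▸ rfl
  rw [hA, hB, takeWhile_take]
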